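-- pv_equiv track=rewrite | github.com/Kumar-laxmi/Algorithms | Python/Deadlock Avoidance/bankers_algorithm.py | calculate_available
-- ===== SOURCE A (Python) =====
-- def calculate_available(total: list, allocated: list) -> list:
--     """Calculates the availale vector by first finding sum of allocated
--     resources for all processes and subtracting it from the total
--     resources of each type.
--
--     Args:
--         total (list): 1-D vector of total resources of each type.
--         allocated (list): 2-D matrix of current resources allocated to processes.
--
--     Returns:
--         list: 1-D vector of current available resources of each type.
--     """
--     available = []
--     num_process = len(allocated)
--     num_resource = len(total)
--     for r in range(num_resource):
--         allocated_sum = 0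
--         for p in range(num_process):
--             allocated_sum += allocated[p][r]
--         available.append(total[r] - allocated_sum)
--     return available
-- ===== SOURCE B (Python) =====
-- def calculate_available(total: list, allocated: list) -> list:
--     """Structural recursion on the process list: the available vector after
--     all processes is the available vector after the remaining processes with
--     the first process's row subtracted element-wise (zip, no indexing)."""
--     if not allocated:
--         return list(total)
--     rest = calculate_available(total, allocated[1:])
--     return [a - x for a, x in zip(rest, allocated[0])]
-- ===== Notes on version B (the rewrite author's own statement) =====
-- stated objective: alternative
-- what changed: B replaces A's index-driven nested loops (per-resource column sums appended to the output) with structural recursion on the process list: the result for row::rest is an element-wise zip subtraction of the first row from the recursively computed vector for rest, with no index arithmetic anywhere.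
import Mathlib
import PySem

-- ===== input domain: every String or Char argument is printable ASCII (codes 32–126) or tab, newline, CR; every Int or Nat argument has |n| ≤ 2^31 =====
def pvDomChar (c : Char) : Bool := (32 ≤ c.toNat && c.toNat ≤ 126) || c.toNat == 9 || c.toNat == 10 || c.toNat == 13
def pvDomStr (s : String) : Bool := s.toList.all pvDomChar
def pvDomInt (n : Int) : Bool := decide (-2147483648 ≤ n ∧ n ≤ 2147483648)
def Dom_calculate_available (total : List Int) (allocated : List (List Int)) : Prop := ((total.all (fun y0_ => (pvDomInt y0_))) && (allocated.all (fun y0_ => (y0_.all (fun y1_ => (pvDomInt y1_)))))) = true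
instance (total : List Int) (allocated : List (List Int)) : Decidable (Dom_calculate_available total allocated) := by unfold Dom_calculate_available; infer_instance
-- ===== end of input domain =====

-- B computes the available vector by structural recursion on the process list with
-- element-wise zip subtraction, instead of A's index-driven per-resource column sums;
-- same cost, different decomposition.

-- ===== PORT A =====
-- column-major: for each resource r, sum the allocated column, append total[r] - sum
def calculate_available (total : List Int) (allocated : List (List Int)) : List Int :=
  let num_process := allocated.length
  let num_resource := total.length
  (List.range num_resource).foldl (fun available r =>
    let allocated_sum :=
      (List.range num_process).foldl (fun acc p => acc + ((allocated.getD p []).getD r 0)) 0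
    available ++ [total.getD r 0 - allocated_sum]) []

-- ===== PORT B =====
-- structural recursion on allocated; zipWith subtraction, no indices
def calculate_available_alt (total : List Int) (allocated : List (List Int)) : List Int :=
  match allocated with
  | [] => total
  | row :: rest => List.zipWith (fun a x => a - x) (calculate_available_alt total rest) row

-- ===== PRECONDITION & SPEC =====
-- Pre_ excludes exactly the inputs where Python A raises IndexError: some allocation row
-- shorter than the resource vector (A indexes row[r] for every r < len(total)).
def Pre_calculate_available (total : List Int) (allocated : List (List Int)) : Prop :=
  ∀ row ∈ allocated, total.length ≤ row.length
instance (total : List Int) (allocated : List (List Int)) : Decidable (Pre_calculate_available total allocated) := by unfold Pre_calculate_available; infer_instance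

def pvWitness_calculate_available : List Int × List (List Int) := ([7, 5], [[1, 2], [3, 0]])

def Spec_calculate_available (total : List Int) (allocated : List (List Int)) (out : List Int) : Prop := out = calculate_available_alt total allocated
instance (total : List Int) (allocated : List (List Int)) (out : List Int) : Decidable (Spec_calculate_available total allocated out) := by unfold Spec_calculate_available; infer_instance

-- ===== CLAIM (what is proved, stated in full; the proofs are below) =====
def Claim_equal_calculate_available : Prop := ∀ (total : List Int) (allocated : List (List Int)), Dom_calculate_available total allocated → Pre_calculate_available total allocated → Spec_calculate_available total allocated (calculate_available total allocated)

-- ===== LEMMAS AND PROOFS =====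

-- A's outer loop: foldl with append is a map over the range
theorem pv_foldl_append_map (g : ℕ → Int) :
    ∀ (l : List ℕ) (c : List Int),
      l.foldl (fun av r => av ++ [g r]) c = c ++ l.map g := by
  intro l
  induction l with
  | nil => simp
  | cons x xs ih => intro c; simp [List.foldl_cons, ih]

-- A's inner loop: the column sum over indices is the sum over the rows
theorem pv_colsum (r : ℕ) :
    ∀ (l : List (List Int)) (c : Int),
      (List.range l.length).foldl (fun acc p => acc + ((l.getD p []).getD r 0)) c
        = c + (l.map (fun row => row.getD r 0)).sum := by
  intro l
  induction l with
  | nil => simp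
  | cons x xs ih =>
      intro c
      simp only [List.length_cons, List.range_succ_eq_map, List.foldl_cons, List.foldl_map,
        List.getD_cons_zero, List.getD_cons_succ]
      rw [ih]
      simp only [List.map_cons, List.sum_cons]
      ring

-- B's recursion: under Pre_, length is total.length and each entry is
-- total[r] minus the sum of the corresponding column
theorem pv_b (total : List Int) :
    ∀ (rows : List (List Int)), (∀ row ∈ rows, total.length ≤ row.length) →
      (calculate_available_alt total rows).length = total.length ∧
      ∀ r : ℕ, r < total.length →
        (calculate_available_alt total rows).getD r 0
          = total.getD r 0 - (rows.map (fun row => row.getD r 0)).sum := by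
  intro rows
  induction rows with
  | nil => intro _; exact ⟨rfl, fun r _ => by simp [calculate_available_alt]⟩
  | cons x xs ih =>
      intro h
      have hx : total.length ≤ x.length := h x (by simp)
      obtain ⟨hL, hE⟩ := ih (fun row hm => h row (by simp [hm]))
      have hlen : (calculate_available_alt total (x :: xs)).length = total.length := by
        simp [calculate_available_alt, hL]; omega
      refine ⟨hlen, fun r hr => ?_⟩
      have hr1 : r < (calculate_available_alt total xs).length := by omega
      have hr2 : r < x.length := by omega
      have : (calculate_available_alt total (x :: xs)).getD r 0
          = (calculate_available_alt total xs).getD r 0 - x.getD r 0 := by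
        simp only [calculate_available_alt]
        rw [List.getD_eq_getElem _ 0 (by simp [hL]; omega)]
        rw [List.getElem_zipWith]
        rw [List.getD_eq_getElem _ 0 hr1, List.getD_eq_getElem _ 0 hr2]
      rw [this, hE r hr]
      simp only [List.map_cons, List.sum_cons]
      ring

-- ===== VERDICT (by name: the statement is the Claim_ definition above) =====
theorem calculate_available_spec : Claim_equal_calculate_available := by
  intro total allocated _ hpre
  unfold Spec_calculate_available calculate_available
  rw [pv_foldl_append_map]
  obtain ⟨hL, hE⟩ := pv_b total allocated hpre
  apply List.ext_getElem
  · rw [hL]; simp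
  · intro i h1 h2
    have hi : i < total.length := hL ▸ h2
    simp only [List.nil_append, List.getElem_map, List.getElem_range]
    rw [pv_colsum]
    rw [← List.getD_eq_getElem _ 0 h2, hE i hi]
    have hg : total.getD i 0 = total[i] := List.getD_eq_getElem total 0 hi
    rw [hg]
    ring
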